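-- pv_equiv track=rewrite | github.com/haochenaustralia/COMP9021_20T1 | Quiz/04/quiz_4.py | get_number_by_items
-- ===== SOURCE A (Python) =====
-- def get_number_by_items(pattern, items):
--     pattern_list = list(pattern)
--     index = 0
--     for underscore_index in range(len(pattern_list)):
--         if pattern_list[underscore_index] == '_':
--             pattern_list[underscore_index] = items[index]
--             index += 1
--     # 执行完for循环之后
--     # pattern_list = ['3','1','2','4']
--     number = int("".join(pattern_list))
--     return number
-- ===== SOURCE B (Python) =====
-- def get_number_by_items(pattern, items):
--     parts = pattern.split('_')
--     pieces = [parts[0]]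
--     for item, part in zip(items, parts[1:]):
--         pieces += [item, part]
--     return int(''.join(pieces))
-- ===== Notes on version B (the rewrite author's own statement) =====
-- stated objective: idiomatic
-- what changed: B splits the pattern at '_' once and zip-interleaves the resulting literal segments with the items, instead of A's per-character scan that mutates a list of code points with a running item index.
import Mathlib
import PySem

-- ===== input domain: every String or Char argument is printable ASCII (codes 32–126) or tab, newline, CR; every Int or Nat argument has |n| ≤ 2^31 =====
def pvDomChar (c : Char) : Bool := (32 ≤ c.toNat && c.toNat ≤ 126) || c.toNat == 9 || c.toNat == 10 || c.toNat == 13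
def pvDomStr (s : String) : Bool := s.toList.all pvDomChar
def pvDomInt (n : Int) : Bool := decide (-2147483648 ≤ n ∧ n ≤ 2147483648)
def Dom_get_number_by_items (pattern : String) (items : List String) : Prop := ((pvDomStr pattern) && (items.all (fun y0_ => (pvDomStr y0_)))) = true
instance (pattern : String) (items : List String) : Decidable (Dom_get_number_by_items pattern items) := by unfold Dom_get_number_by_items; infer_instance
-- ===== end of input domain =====

-- B splits the pattern at '_' once and zip-interleaves the literal segments with the
-- items, instead of A's per-character scan mutating a code-point list with an index.

-- ===== PORT A =====
-- A's for-loop over the characters of `pattern`: each '_' is replaced by items[index]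
-- (pyGet? = none is Python's IndexError), every other character kept as a 1-char string.
def getNumberALoop (ps : List Char) (items : List String) (index : Nat) : Option (List (List Char)) :=
  match ps with
  | [] => some []
  | c :: rest =>
    if c == '_' then
      (PySem.List.pyGet? items (index : Int)).bind fun it =>
        (getNumberALoop rest items (index + 1)).map (fun t => it.toList :: t)
    else
      (getNumberALoop rest items index).map (fun t => [c] :: t)

-- int("".join(pattern_list)); ofChars? = none is Python's ValueError. The two `none`
-- fallbacks return 0: those inputs are exactly the ones Pre_ excludes (A raises there).
def get_number_by_items (pattern : String) (items : List String) : Int :=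
  match getNumberALoop pattern.toList items 0 with
  | none => 0
  | some l => (PySem.Int.ofChars? (PySem.Chars.join [] l)).getD 0

-- ===== PORT B =====
-- Source B: parts = pattern.split('_') (splitOn '_' on the code points is exact for this
-- non-empty separator); pieces starts as [parts[0]]; the for-loop over
-- zip(items, parts[1:]) appends [item, part]; return int(''.join(pieces)).
-- splitOn never returns [], so the [] branch (parts[0] on []) is unreachable.
def get_number_by_items_alt (pattern : String) (items : List String) : Int :=
  match pattern.toList.splitOn '_' with
  | [] => 0
  | p0 :: rest =>
    let pieces := (items.zip rest).foldl (fun acc p => acc ++ [p.1.toList, p.2]) [p0]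
    (PySem.Int.ofChars? (PySem.Chars.join [] pieces)).getD 0

-- ===== PRECONDITION & SPEC =====
-- pvFilled is the string A builds, described directly from the input (segments of the
-- pattern between underscores, interleaved with the items); used only by Pre_.
def pvFilled (pattern : String) (items : List String) : List Char :=
  match pattern.toList.splitOn '_' with
  | [] => []
  | p0 :: rest => p0 ++ ((items.zip rest).map (fun p => p.1.toList ++ p.2)).flatten

-- Pre_ excludes exactly the inputs on which Python A raises: fewer items than
-- underscores (IndexError: split yields one segment more than the underscore count)
-- or a filled string int() rejects (ValueError).
def Pre_get_number_by_items (pattern : String) (items : List String) : Prop :=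
  (pattern.toList.splitOn '_').length ≤ items.length + 1 ∧
  (PySem.Int.ofChars? (pvFilled pattern items)).isSome = true
instance (pattern : String) (items : List String) : Decidable (Pre_get_number_by_items pattern items) := by unfold Pre_get_number_by_items; infer_instance

def pvWitness_get_number_by_items : String × List String := ("3_2_", ["1", "4"])

def Spec_get_number_by_items (pattern : String) (items : List String) (out : Int) : Prop := out = get_number_by_items_alt pattern items
instance (pattern : String) (items : List String) (out : Int) : Decidable (Spec_get_number_by_items pattern items out) := by unfold Spec_get_number_by_items; infer_instance

-- ===== CLAIM (what is proved, stated in full; the proofs are below) =====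
def Claim_equal_get_number_by_items : Prop := ∀ (pattern : String) (items : List String), Dom_get_number_by_items pattern items → Pre_get_number_by_items pattern items → Spec_get_number_by_items pattern items (get_number_by_items pattern items)

-- ===== LEMMAS AND PROOFS =====

-- Characterisation of A's loop: given enough items, it succeeds and its pieces
-- concatenate to segment 0 followed by the (item ++ segment) interleaving.
theorem aloop_spec (items : List String) :
    ∀ (cs : List Char) (index : Nat) (p0 : List Char) (rest : List (List Char)),
      List.splitOnP (· == '_') cs = p0 :: rest → index + rest.length ≤ items.length →
      ∃ l, getNumberALoop cs items index = some l ∧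
        l.flatten = p0 ++ (((items.drop index).zip rest).map (fun p => p.1.toList ++ p.2)).flatten := by
  intro cs
  induction cs with
  | nil =>
    intro index p0 rest hsp _
    simp only [List.splitOnP_nil, List.cons.injEq] at hsp
    obtain ⟨rfl, rfl⟩ := hsp
    exact ⟨[], rfl, by simp⟩
  | cons c cs ih =>
    intro index p0 rest hsp hlen
    rw [List.splitOnP_cons] at hsp
    by_cases hc : c = '_'
    · subst hc
      simp only [beq_self_eq_true, if_pos, List.cons.injEq] at hsp
      obtain ⟨rfl, rfl⟩ := hsp
      rcases hsp' : List.splitOnP (· == '_') cs with _ | ⟨q0, qs⟩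
      · exact absurd hsp' (List.splitOnP_ne_nil _ _)
      · rw [hsp'] at hlen
        have hidx : index < items.length := by simp at hlen; omega
        obtain ⟨l', hA, hF⟩ := ih (index + 1) q0 qs hsp' (by simp at hlen ⊢; omega)
        refine ⟨items[index].toList :: l', ?_, ?_⟩
        · simp only [getNumberALoop, beq_self_eq_true, if_pos,
            PySem.List.pyGet?_natCast, List.getElem?_eq_getElem hidx, Option.bind_some, hA,
            Option.map_some]
        · have hdrop : items.drop index = items[index] :: items.drop (index + 1) :=
            (List.getElem_cons_drop hidx).symm
          rw [hdrop]
          simp only [List.zip_cons_cons, List.map_cons, List.flatten_cons, List.nil_append,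
            hF, List.append_assoc]
    · have hcb : (c == '_') = false := by simp [hc]
      rw [hcb] at hsp
      simp only [Bool.false_eq_true, if_false] at hsp
      rcases hsp' : List.splitOnP (· == '_') cs with _ | ⟨q0, qs⟩
      · exact absurd hsp' (List.splitOnP_ne_nil _ _)
      · rw [hsp'] at hsp
        simp only [List.modifyHead, List.cons.injEq] at hsp
        obtain ⟨rfl, rfl⟩ := hsp
        obtain ⟨l', hA, hF⟩ := ih index q0 qs hsp' hlen
        refine ⟨[c] :: l', ?_, ?_⟩
        · simp only [getNumberALoop, hcb, Bool.false_eq_true, if_false, hA, Option.map_some]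
        · simp [hF]

-- ''.join(parts) is the plain concatenation of the parts.
theorem join_nil_eq_flatten : ∀ (parts : List (List Char)), PySem.Chars.join [] parts = parts.flatten
  | [] => by simp [PySem.Chars.join, List.intercalate]
  | [p] => by simp [PySem.Chars.join, List.intercalate]
  | p :: q :: rest => by
    have ih := join_nil_eq_flatten (q :: rest)
    simp only [PySem.Chars.join, List.intercalate] at ih ⊢
    rw [show List.intersperse ([] : List Char) (p :: q :: rest)
          = p :: [] :: List.intersperse [] (q :: rest) from rfl]
    simp [ih]

-- B's pieces-building loop, characterised: the foldl appends two pieces per zip pair.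
theorem bfold_flatten (zs : List (String × List Char)) :
    ∀ (init : List (List Char)),
      ((zs.foldl (fun acc p => acc ++ [p.1.toList, p.2]) init).flatten)
        = init.flatten ++ (zs.map (fun p => p.1.toList ++ p.2)).flatten := by
  induction zs with
  | nil => intro init; simp
  | cons z zs ih =>
    intro init
    rw [List.foldl_cons, ih]
    simp [List.append_assoc]

-- ===== VERDICT (by name: the statement is the Claim_ definition above) =====
theorem get_number_by_items_spec : Claim_equal_get_number_by_items := by
  intro pattern items _ hpre
  unfold Spec_get_number_by_items
  obtain ⟨hlen, -⟩ := hpre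
  unfold get_number_by_items get_number_by_items_alt
  rcases hsp : pattern.toList.splitOn '_' with _ | ⟨p0, rest⟩
  · exact absurd hsp (List.splitOnP_ne_nil _ _)
  · rw [hsp] at hlen
    have hsp' : List.splitOnP (· == '_') pattern.toList = p0 :: rest := hsp
    obtain ⟨l, hA, hF⟩ := aloop_spec items pattern.toList 0 p0 rest hsp' (by simp at hlen ⊢; omega)
    rw [hA]
    simp only [join_nil_eq_flatten, hF, bfold_flatten, List.drop_zero, List.flatten_cons,
      List.flatten_nil, List.append_nil]
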